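-- pv_equiv track=rewrite | github.com/fdduarte/calendar-opt | libs/stats_parser/pattern_generator/pattern.py | _generate_home_away_pattern_string
-- ===== SOURCE A (Python) =====
-- import itertools
--
-- def _generate_home_away_pattern_string(start_date: int, end_date: int, breaks: int) -> list[str]:
--   """
--   Funci칩n que retorna una lista con todos los patrones posibles
--   de 1 y 0 para el largo del campeonato
--   """
--   length = end_date - start_date + 1
--   patterns = ["".join(seq) for seq in itertools.product("01", repeat=length)]
--
--   # Se eliminan patrones que rompan maximo dos (0 o 1) seguidos
--   patterns_filtered = list(filter(lambda x: x.count('000') == 0 and x.count('111') == 0, patterns))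
--
--   # Patrones con m치ximo un partido de diferencia
--   same_matches_fil = lambda x: x.count('1') == x.count('0') + 1 or x.count('1') == x.count('0') - 1
--   patterns_filtered = list(filter(same_matches_fil, patterns_filtered))
--
--   # Patrones deben tener maximo n breaks
--   patterns_filtered = list(filter(lambda x: x.count('11') <= breaks, patterns_filtered))
--   patterns_filtered = list(filter(lambda x: x.count('00') <= breaks, patterns_filtered))
--
--   return patterns_filtered
-- ===== SOURCE B (Python) =====
-- def _generate_home_away_pattern_string(start_date: int, end_date: int, breaks: int) -> list[str]:
--   """
--   Level-by-level pruned generation: only prefixes that can still become a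
--   valid pattern (no three equal chars in a row, at most `breaks` '00' pairs
--   and at most `breaks` '11' pairs) are extended, in lexicographic order.
--   """
--   length = end_date - start_date + 1
--   # state: (pattern, number_of_ones, count_of_'00'_pairs, count_of_'11'_pairs)
--   states = [("", 0, 0, 0)]
--   for _ in range(length):
--     nxt = []
--     for s, ones, b0, b1 in states:
--       if not s.endswith("00"):
--         nb0 = b0 + (1 if s.endswith("0") else 0)
--         if nb0 <= breaks:
--           nxt.append((s + "0", ones, nb0, b1))
--       if not s.endswith("11"):
--         nb1 = b1 + (1 if s.endswith("1") else 0)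
--         if nb1 <= breaks:
--           nxt.append((s + "1", ones + 1, b0, nb1))
--     states = nxt
--   # keep patterns whose '1'-count differs from the '0'-count by exactly one
--   return [s for s, ones, b0, b1 in states if 2 * ones == len(s) + 1 or 2 * ones == len(s) - 1]
-- ===== Notes on version B (the rewrite author's own statement) =====
-- stated objective: alternative
-- what changed: A enumerates all 2^n binary strings and filters them four times; B grows only the prefixes that can still become valid (no three equal symbols in a row, at most `breaks` '00'/'11' pairs) level by level in lexicographic order, keeping the one-count and pair-counts incrementally, and applies the balance test at the end.
import Mathlib
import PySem

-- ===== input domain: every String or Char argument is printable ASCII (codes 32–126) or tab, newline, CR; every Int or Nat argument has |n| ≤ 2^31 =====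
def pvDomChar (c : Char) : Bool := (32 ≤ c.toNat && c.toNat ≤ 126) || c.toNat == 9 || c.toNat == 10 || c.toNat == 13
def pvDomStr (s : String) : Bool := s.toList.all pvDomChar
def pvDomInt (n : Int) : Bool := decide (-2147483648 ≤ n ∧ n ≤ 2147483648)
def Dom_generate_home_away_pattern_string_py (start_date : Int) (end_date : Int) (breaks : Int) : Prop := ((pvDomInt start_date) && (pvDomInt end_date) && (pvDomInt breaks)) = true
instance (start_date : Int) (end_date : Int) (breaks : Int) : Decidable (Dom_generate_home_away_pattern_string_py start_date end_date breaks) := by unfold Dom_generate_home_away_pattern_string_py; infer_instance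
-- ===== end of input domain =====

-- B replaces A's exhaustive 2^n enumeration with level-by-level generation that extends
-- only still-valid prefixes (objective: alternative, output-sensitive enumeration).

-- ===== PORT A =====
-- itertools.product("01", repeat=n): all length-n tuples over ['0','1'] in lexicographic
-- order (first position varies slowest); "".join then makes the string.
def pvProd : Nat → List (List Char)
  | 0 => [[]]
  | n + 1 => ['0', '1'].flatMap (fun c => (pvProd n).map (fun p => c :: p))

def generate_home_away_pattern_string_py (start_date : Int) (end_date : Int) (breaks : Int) : List String :=
  let length := end_date - start_date + 1
  -- Python raises ValueError for repeat < 0 (excluded by Pre_); .toNat is only reached for length ≥ 0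
  let patterns := (pvProd length.toNat).map String.ofList
  let pf1 := patterns.filter (fun x => PySem.Str.count x "000" == 0 && PySem.Str.count x "111" == 0)
  let pf2 := pf1.filter (fun x =>
    ((PySem.Str.count x "1" : Int) == (PySem.Str.count x "0" : Int) + 1) ||
    ((PySem.Str.count x "1" : Int) == (PySem.Str.count x "0" : Int) - 1))
  let pf3 := pf2.filter (fun x => decide ((PySem.Str.count x "11" : Int) ≤ breaks))
  let pf4 := pf3.filter (fun x => decide ((PySem.Str.count x "00" : Int) ≤ breaks))
  pf4

-- ===== PORT B =====
-- one pass of the level loop: extend each state (pattern, ones, '00'-pairs, '11'-pairs)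
-- by '0' then by '1', skipping extensions that break a constraint
def pvStep (breaks : Int) (st : List (List Char × Int × Int × Int)) : List (List Char × Int × Int × Int) :=
  st.flatMap (fun t =>
    (if PySem.Chars.endswith t.1 ['0', '0'] then []
     else if (t.2.2.1 + (if PySem.Chars.endswith t.1 ['0'] then 1 else 0)) ≤ breaks then
       [(t.1 ++ ['0'], t.2.1, t.2.2.1 + (if PySem.Chars.endswith t.1 ['0'] then 1 else 0), t.2.2.2)]
     else []) ++
    (if PySem.Chars.endswith t.1 ['1', '1'] then []
     else if (t.2.2.2 + (if PySem.Chars.endswith t.1 ['1'] then 1 else 0)) ≤ breaks then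
       [(t.1 ++ ['1'], t.2.1 + 1, t.2.2.1, t.2.2.2 + (if PySem.Chars.endswith t.1 ['1'] then 1 else 0))]
     else []))

def generate_home_away_pattern_string_py_alt (start_date : Int) (end_date : Int) (breaks : Int) : List String :=
  let length := end_date - start_date + 1
  let states := (List.range length.toNat).foldl (fun st _ => pvStep breaks st) [([], 0, 0, 0)]
  (states.filter (fun t =>
    (2 * t.2.1 == (t.1.length : Int) + 1) || (2 * t.2.1 == (t.1.length : Int) - 1))).map
    (fun t => String.ofList t.1)

-- ===== PRECONDITION & SPEC =====
-- Pre_ excludes end_date - start_date + 1 < 0, where A's itertools.product raises ValueError.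
def Pre_generate_home_away_pattern_string_py (start_date : Int) (end_date : Int) (breaks : Int) : Prop :=
  0 ≤ end_date - start_date + 1
instance (start_date : Int) (end_date : Int) (breaks : Int) : Decidable (Pre_generate_home_away_pattern_string_py start_date end_date breaks) := by unfold Pre_generate_home_away_pattern_string_py; infer_instance

def pvWitness_generate_home_away_pattern_string_py : Int × Int × Int := (1, 3, 1)

def Spec_generate_home_away_pattern_string_py (start_date : Int) (end_date : Int) (breaks : Int) (out : List String) : Prop := out = generate_home_away_pattern_string_py_alt start_date end_date breaks
instance (start_date : Int) (end_date : Int) (breaks : Int) (out : List String) : Decidable (Spec_generate_home_away_pattern_string_py start_date end_date breaks out) := by unfold Spec_generate_home_away_pattern_string_py; infer_instance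

-- ===== CLAIM (what is proved, stated in full; the proofs are below) =====
def Claim_equal_generate_home_away_pattern_string_py : Prop := ∀ (start_date : Int) (end_date : Int) (breaks : Int), Dom_generate_home_away_pattern_string_py start_date end_date breaks → Pre_generate_home_away_pattern_string_py start_date end_date breaks → Spec_generate_home_away_pattern_string_py start_date end_date breaks (generate_home_away_pattern_string_py start_date end_date breaks)


-- ===== LEMMAS AND PROOFS =====

-- greedy non-overlapping substring count (the recursion Python's str.count performs)
def pvCnt (sub : List Char) (s : List Char) : Nat :=
  match s with
  | [] => 0
  | c :: t =>
    if sub.isPrefixOf (c :: t) then pvCnt sub (t.drop (sub.length - 1)) + 1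
    else pvCnt sub t
termination_by s.length
decreasing_by
  · simp only [List.length_cons]
    have := List.length_drop (l := t) (i := sub.length - 1)
    omega
  · simp

lemma pvCnt_nil (sub : List Char) : pvCnt sub [] = 0 := by rw [pvCnt]

lemma pvCnt_cons (sub : List Char) (c : Char) (t : List Char) :
    pvCnt sub (c :: t) =
      if sub.isPrefixOf (c :: t) then pvCnt sub (t.drop (sub.length - 1)) + 1
      else pvCnt sub t := by rw [pvCnt]

-- ---- suffix / prefix / infix helpers ----

lemma single_prefix_iff (x : Char) (w : List Char) : [x] <+: w ↔ w.head? = some x := by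
  cases w <;> simp [List.cons_prefix_cons, eq_comm]

lemma single_suffix_iff_getLast (x : Char) (l : List Char) :
    [x] <:+ l ↔ l.getLast? = some x := by
  rw [show ([x] <:+ l) ↔ ([x].reverse <+: l.reverse) from (List.reverse_prefix).symm]
  simp [single_prefix_iff]

lemma suffix_append_right (u l : List Char) (c : Char) (h : u <:+ l) :
    u ++ [c] <:+ l ++ [c] := by
  obtain ⟨w, rfl⟩ := h; exact ⟨w, by simp⟩

lemma single_suffix_of_suffix (x : Char) (u l : List Char) (hu : u ≠ []) (h : u <:+ l) :
    ([x] <:+ u ↔ [x] <:+ l) := by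
  obtain ⟨w, rfl⟩ := h
  rw [single_suffix_iff_getLast, single_suffix_iff_getLast,
    List.getLast?_append_of_ne_nil w hu]

lemma suffix_append_singleton (q p : List Char) (c : Char) :
    q <:+ p ++ [c] ↔ q.reverse <+: c :: p.reverse := by
  rw [show (q <:+ p ++ [c]) ↔ (q.reverse <+: (p ++ [c]).reverse) from (List.reverse_prefix).symm]
  simp

lemma triple_suffix_append (c : Char) (p : List Char) :
    [c, c, c] <:+ p ++ [c] ↔ [c, c] <:+ p := by
  rw [suffix_append_singleton]
  simp [List.cons_prefix_cons]
  rw [show ([c, c] <:+ p) ↔ ([c, c].reverse <+: p.reverse) from (List.reverse_prefix).symm]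
  simp [List.cons_prefix_cons]

lemma infix_append_singleton (sub p : List Char) (c : Char) :
    sub <:+: p ++ [c] ↔ sub <:+: p ∨ sub <:+ p ++ [c] := by
  rw [show (sub <:+: p ++ [c]) ↔ (sub.reverse <:+: (p ++ [c]).reverse) from (List.reverse_infix).symm]
  rw [show ((p ++ [c]).reverse : List Char) = c :: p.reverse by simp]
  rw [List.infix_cons_iff]
  rw [show (sub.reverse <:+: p.reverse) ↔ (sub <:+: p) from List.reverse_infix]
  rw [show (sub.reverse <+: c :: p.reverse) ↔ (sub <:+ p ++ [c]) from (suffix_append_singleton sub p c).symm]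
  tauto

-- ---- pvCnt facts ----

lemma pvCnt_eq_zero_iff (sub s : List Char) (h : sub ≠ []) :
    pvCnt sub s = 0 ↔ ¬ sub <:+: s := by
  induction s using pvCnt.induct sub with
  | case1 => simp [pvCnt_nil, h]
  | case2 c t hpre ih =>
    rw [pvCnt_cons, if_pos hpre]
    have hp : sub <+: c :: t := List.isPrefixOf_iff_prefix.mp hpre
    simp [hp.isInfix]
  | case3 c t hpre ih =>
    rw [pvCnt_cons, if_neg hpre, ih, List.infix_cons_iff]
    have : ¬ sub <+: c :: t := fun hh => hpre (List.isPrefixOf_iff_prefix.mpr hh)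
    tauto

lemma pvCnt_single (c : Char) (s : List Char) : pvCnt [c] s = s.count c := by
  induction s using pvCnt.induct [c] with
  | case1 => simp [pvCnt_nil]
  | case2 a t hpre ih =>
    rw [pvCnt_cons, if_pos hpre]
    have hp : [c] <+: a :: t := List.isPrefixOf_iff_prefix.mp hpre
    rw [List.cons_prefix_cons] at hp
    obtain ⟨rfl, -⟩ := hp
    simp only [List.length_cons, List.length_nil, Nat.sub_self, List.drop_zero] at ih ⊢
    rw [ih]
    simp [List.count_cons]
  | case3 a t hpre ih =>
    rw [pvCnt_cons, if_neg hpre, ih]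
    have : ¬ a = c := by
      intro hh
      exact hpre (List.isPrefixOf_iff_prefix.mpr (by rw [hh]; exact List.cons_prefix_cons.mpr ⟨rfl, List.nil_prefix⟩))
    simp [List.count_cons, this]

lemma pvCnt_singleton_of_not_suffix (sub : List Char) (c : Char) (hsub : sub ≠ [])
    (hns : ¬ sub <:+ [c]) : pvCnt sub [c] = 0 := by
  rw [pvCnt_cons]
  have hneg : ¬ sub.isPrefixOf [c] = true := by
    intro hpre
    have hp' := List.isPrefixOf_iff_prefix.mp hpre
    have hlen : 1 ≤ sub.length := by
      cases sub with
      | nil => exact absurd rfl hsub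
      | cons _ _ => simp
    have heq : sub = [c] := hp'.eq_of_length_le (by simpa using hlen)
    exact hns (by rw [heq])
  rw [if_neg hneg, pvCnt_nil]

lemma pvCnt_append_of_not_suffix (sub : List Char) (p : List Char) (c : Char)
    (hsub : sub ≠ []) (h : ¬ sub <:+ p ++ [c]) :
    pvCnt sub (p ++ [c]) = pvCnt sub p := by
  suffices H : ∀ n (p : List Char), p.length ≤ n → ¬ sub <:+ p ++ [c] →
      pvCnt sub (p ++ [c]) = pvCnt sub p from H p.length p le_rfl h
  intro n
  induction n with
  | zero =>
    intro p hp hns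
    cases p with
    | cons a t => simp at hp
    | nil =>
      rw [List.nil_append, pvCnt_nil,
        pvCnt_singleton_of_not_suffix sub c hsub (by simpa using hns)]
  | succ n ih =>
    intro p hp hns
    cases p with
    | nil =>
      rw [List.nil_append, pvCnt_nil,
        pvCnt_singleton_of_not_suffix sub c hsub (by simpa using hns)]
    | cons a t =>
      simp only [List.cons_append] at hns ⊢
      rw [pvCnt_cons, pvCnt_cons (t := t)]
      by_cases hpre : sub.isPrefixOf (a :: t)
      · have hpre' : sub.isPrefixOf (a :: (t ++ [c])) := by
          rw [List.isPrefixOf_iff_prefix] at hpre ⊢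
          exact hpre.trans (by rw [← List.cons_append]; exact List.prefix_append _ _)
        rw [if_pos hpre', if_pos hpre]
        have hlen : sub.length - 1 ≤ t.length := by
          have := (List.isPrefixOf_iff_prefix.mp hpre).length_le
          simp at this; omega
        rw [List.drop_append_of_le_length hlen]
        have hns' : ¬ sub <:+ t.drop (sub.length - 1) ++ [c] := by
          intro hsfx
          refine hns (hsfx.trans ?_)
          rw [← List.cons_append]
          exact suffix_append_right _ _ _ ((List.drop_suffix _ _).trans (List.suffix_cons a t))
        have := ih (t.drop (sub.length - 1))
          (by have := List.length_drop (l := t) (i := sub.length - 1); simp at hp; omega) hns'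
        omega
      · by_cases hpre2 : sub.isPrefixOf (a :: (t ++ [c]))
        · exfalso
          have hp2 := List.isPrefixOf_iff_prefix.mp hpre2
          have hlen2 : (a :: t).length < sub.length := by
            by_contra hle
            push_neg at hle
            refine hpre (List.isPrefixOf_iff_prefix.mpr
              (List.prefix_of_prefix_length_le hp2 ?_ hle))
            rw [← List.cons_append]; exact List.prefix_append _ _
          have heq : sub = a :: (t ++ [c]) := hp2.eq_of_length_le (by simp at hlen2 ⊢; omega)
          refine hns ?_
          rw [heq]
        · rw [if_neg hpre2, if_neg hpre]
          refine ih t (by simp at hp; omega) ?_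
          intro hsfx
          exact hns (hsfx.trans ⟨[a], rfl⟩)

lemma pvCnt_pair_append (c : Char) (p : List Char) (h : ¬ [c, c] <:+ p) :
    pvCnt [c, c] (p ++ [c]) = pvCnt [c, c] p + (if [c] <:+ p then 1 else 0) := by
  suffices H : ∀ n (p : List Char), p.length ≤ n → ¬ [c, c] <:+ p →
      pvCnt [c, c] (p ++ [c]) = pvCnt [c, c] p + (if [c] <:+ p then 1 else 0) from
    H p.length p le_rfl h
  intro n
  induction n with
  | zero =>
    intro p hp h0
    cases p with
    | cons a t => simp at hp
    | nil =>
      rw [List.nil_append, pvCnt_nil, if_neg (by simp),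
        pvCnt_singleton_of_not_suffix _ _ (by simp)
          (fun hs => by have := hs.length_le; simp at this)]
  | succ n ih =>
    intro p hp h0
    cases p with
    | nil =>
      rw [List.nil_append, pvCnt_nil, if_neg (by simp),
        pvCnt_singleton_of_not_suffix _ _ (by simp)
          (fun hs => by have := hs.length_le; simp at this)]
    | cons a t =>
      simp only [List.cons_append] at h0 ⊢
      rw [pvCnt_cons, pvCnt_cons (t := t)]
      simp only [show ([c, c] : List Char).length - 1 = 1 from rfl]
      by_cases h2 : ([c, c] : List Char).isPrefixOf (a :: t)
      · have hp2 := List.isPrefixOf_iff_prefix.mp h2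
        rw [List.cons_prefix_cons] at hp2
        obtain ⟨hca, hct⟩ := hp2
        have h2' : ([c, c] : List Char).isPrefixOf (a :: (t ++ [c])) := by
          rw [List.isPrefixOf_iff_prefix, List.cons_prefix_cons]
          exact ⟨hca, hct.trans (List.prefix_append _ _)⟩
        rw [if_pos h2', if_pos h2]
        have ht : t ≠ [] := by
          intro hh; rw [hh] at hct; simp at hct
        have hlt : 1 ≤ t.length := by
          cases t with
          | nil => exact absurd rfl ht
          | cons _ _ => simp
        rw [List.drop_append_of_le_length hlt]
        have hsfx : t.drop 1 <:+ a :: t := (List.drop_suffix 1 t).trans (List.suffix_cons a t)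
        have hg : ¬ [c, c] <:+ t.drop 1 := fun hs => h0 (hs.trans hsfx)
        rw [ih (t.drop 1) (by have := List.length_drop (l := t) (i := 1); simp at hp; omega) hg]
        have hne : t.drop 1 ≠ [] := by
          intro hh
          cases t with
          | nil => exact absurd rfl ht
          | cons b u =>
            simp at hh
            subst hh
            rw [single_prefix_iff] at hct
            simp at hct
            exact h0 (by rw [← hca, ← hct])
        simp only [single_suffix_of_suffix c (t.drop 1) (a :: t) hne hsfx]
        omega
      · by_cases h3 : ([c, c] : List Char).isPrefixOf (a :: (t ++ [c]))
        · have hp3 := List.isPrefixOf_iff_prefix.mp h3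
          rw [List.cons_prefix_cons] at hp3
          obtain ⟨hca, hp3'⟩ := hp3
          have ht : t = [] := by
            cases t with
            | nil => rfl
            | cons b u =>
              exfalso
              apply h2
              rw [List.isPrefixOf_iff_prefix, List.cons_prefix_cons]
              refine ⟨hca, ?_⟩
              rw [single_prefix_iff] at hp3' ⊢
              simpa using hp3'
          subst ht
          rw [if_pos h3, if_neg h2]
          subst hca
          simp [pvCnt_nil, List.suffix_refl]
        · rw [if_neg h3, if_neg h2]
          have hg : ¬ [c, c] <:+ t := fun hs => h0 (hs.trans (List.suffix_cons a t))
          rw [ih t (by simp at hp; omega) hg]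
          cases t with
          | nil =>
            have hac : ¬ [c] <:+ [a] := by
              rw [single_suffix_iff_getLast]
              simp
              intro hh
              apply h3
              subst hh
              simp [List.isPrefixOf_iff_prefix]
            simp [hac]
          | cons b u =>
            simp only [single_suffix_of_suffix c (b :: u) (a :: b :: u) (by simp) (List.suffix_cons a _)]

lemma pvGo_zero (sub l : List Char) (acc : Nat) : PySem.Chars.count.go sub 0 l acc = acc := by
  rw [PySem.Chars.count.go]

lemma pvGo_nil (sub : List Char) (f : Nat) (acc : Nat) :
    PySem.Chars.count.go sub (f + 1) [] acc = acc := by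
  rw [PySem.Chars.count.go]
  simp

lemma pvGo_cons (sub : List Char) (f : Nat) (a : Char) (t : List Char) (acc : Nat) :
    PySem.Chars.count.go sub (f + 1) (a :: t) acc =
      if sub.isPrefixOf (a :: t) then
        PySem.Chars.count.go sub f (List.drop sub.length (a :: t)) (acc + 1)
      else PySem.Chars.count.go sub f t acc := by
  rw [PySem.Chars.count.go]

lemma pvGo_eq (sub : List Char) (hsub : sub ≠ []) :
    ∀ (fuel : Nat) (l : List Char) (acc : Nat), l.length ≤ fuel →
      PySem.Chars.count.go sub fuel l acc = acc + pvCnt sub l := by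
  intro fuel
  induction fuel with
  | zero =>
    intro l acc hl
    have hnil : l = [] := by cases l <;> simp_all
    subst hnil
    rw [pvGo_zero, pvCnt_nil]
    omega
  | succ f ih =>
    intro l acc hl
    cases l with
    | nil => rw [pvGo_nil, pvCnt_nil]; omega
    | cons a t =>
      rw [pvGo_cons, pvCnt_cons]
      by_cases hpre : sub.isPrefixOf (a :: t)
      · rw [if_pos hpre, if_pos hpre]
        have hdrop : List.drop sub.length (a :: t) = t.drop (sub.length - 1) := by
          cases sub with
          | nil => exact absurd rfl hsub
          | cons x s => simp
        rw [hdrop,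
          ih (t.drop (sub.length - 1)) (acc + 1)
            (by have := List.length_drop (l := t) (i := sub.length - 1); simp at hl; omega)]
        omega
      · rw [if_neg hpre, if_neg hpre, ih t acc (by simp at hl; omega)]

lemma count_eq_pvCnt (s sub : List Char) (h : sub ≠ []) :
    PySem.Chars.count s sub = pvCnt sub s := by
  unfold PySem.Chars.count
  rw [if_neg (by simpa [List.isEmpty_iff] using h)]
  rw [pvGo_eq sub h s.length s 0 le_rfl]
  omega

-- ---- notions used by the equivalence argument ----

def pvExt (p : List Char) : List (List Char) := [p ++ ['0'], p ++ ['1']]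

def pvProdE : Nat → List (List Char)
  | 0 => [[]]
  | n + 1 => (pvProdE n).flatMap pvExt

-- A's combined validity filter, stated with pvCnt
def pvValid (breaks : Int) (p : List Char) : Bool :=
  (pvCnt ['0', '0', '0'] p == 0) && (pvCnt ['1', '1', '1'] p == 0) &&
  decide ((pvCnt ['1', '1'] p : Int) ≤ breaks) && decide ((pvCnt ['0', '0'] p : Int) ≤ breaks)

def pvBal (p : List Char) : Bool :=
  (2 * (p.count '1' : Int) == (p.length : Int) + 1) || (2 * (p.count '1' : Int) == (p.length : Int) - 1)

def pvTag (p : List Char) : List Char × Int × Int × Int :=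
  (p, (p.count '1' : Int), (pvCnt ['0', '0'] p : Int), (pvCnt ['1', '1'] p : Int))

-- ---- the two generation orders coincide ----

lemma pvProd_succ (n : Nat) : pvProd (n + 1) = (pvProd n).flatMap pvExt := by
  induction n with
  | zero => rfl
  | succ n ih =>
    calc pvProd (n + 2)
        = ['0', '1'].flatMap (fun c => (pvProd (n + 1)).map (fun p => c :: p)) := by rw [pvProd]
      _ = ['0', '1'].flatMap (fun c => ((pvProd n).flatMap pvExt).map (fun p => c :: p)) := by
            rw [ih]
      _ = ['0', '1'].flatMap (fun c => (pvProd n).flatMap (fun p => pvExt (c :: p))) := by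
            simp [List.map_flatMap, pvExt]
      _ = (['0', '1'].flatMap (fun c => (pvProd n).map (fun p => c :: p))).flatMap pvExt := by
            simp [List.flatMap_assoc, List.flatMap_map]
      _ = (pvProd (n + 1)).flatMap pvExt := by rw [pvProd]

lemma pvProd_eq_pvProdE (n : Nat) : pvProd n = pvProdE n := by
  induction n with
  | zero => rfl
  | succ n ih => rw [pvProd_succ, ih]; rfl

lemma mem_pvProdE_count (n : Nat) (p : List Char) (hp : p ∈ pvProdE n) :
    p.count '0' + p.count '1' = p.length := by
  induction n generalizing p with
  | zero => simp [pvProdE] at hp; subst hp; simp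
  | succ n ih =>
    simp only [pvProdE] at hp
    obtain ⟨q, hq, hmem⟩ := List.mem_flatMap.mp hp
    simp [pvExt] at hmem
    have hq' := ih q hq
    rcases hmem with rfl | rfl <;> simp [List.count_append, List.count_singleton] <;> omega

-- ---- how each pvCnt component reacts to appending one char ----

lemma not_suffix_of_ne_last (x c : Char) (hxc : x ≠ c) (q p : List Char) :
    ¬ (q ++ [x]) <:+ (p ++ [c]) := by
  intro h
  rw [suffix_append_singleton] at h
  have h' : x = c ∧ q <:+ p := by simpa using h
  exact hxc h'.1

lemma pvCnt_triple_append_other (c d : Char) (hdc : d ≠ c) (p : List Char) :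
    pvCnt [d, d, d] (p ++ [c]) = pvCnt [d, d, d] p :=
  pvCnt_append_of_not_suffix _ _ _ (by simp)
    (by simpa using not_suffix_of_ne_last d c hdc [d, d] p)

lemma pvCnt_pair_append_other (c d : Char) (hdc : d ≠ c) (p : List Char) :
    pvCnt [d, d] (p ++ [c]) = pvCnt [d, d] p :=
  pvCnt_append_of_not_suffix _ _ _ (by simp)
    (by simpa using not_suffix_of_ne_last d c hdc [d] p)

lemma pvCnt_triple_zero_append (c : Char) (p : List Char) (h : pvCnt [c, c, c] p = 0) :
    (pvCnt [c, c, c] (p ++ [c]) = 0 ↔ ¬ [c, c] <:+ p) := by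
  rw [pvCnt_eq_zero_iff _ _ (by simp), infix_append_singleton,
    show ([c, c, c] <:+ p ++ [c]) ↔ ([c, c] <:+ p) from triple_suffix_append c p]
  have h' : ¬ [c, c, c] <:+: p := (pvCnt_eq_zero_iff _ _ (by simp)).mp h
  tauto

lemma pvValid_iff (br : Int) (p : List Char) :
    pvValid br p = true ↔
      (pvCnt ['0', '0', '0'] p = 0 ∧ pvCnt ['1', '1', '1'] p = 0 ∧
       (pvCnt ['1', '1'] p : Int) ≤ br ∧ (pvCnt ['0', '0'] p : Int) ≤ br) := by
  simp [pvValid, Bool.and_eq_true, beq_iff_eq, decide_eq_true_eq]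
  tauto

lemma pvValid_append_zero (br : Int) (p : List Char) (hv : pvValid br p = true) :
    pvValid br (p ++ ['0']) = true ↔
      (¬ ['0', '0'] <:+ p ∧ (pvCnt ['0', '0'] p : Int) + (if ['0'] <:+ p then 1 else 0) ≤ br) := by
  obtain ⟨h000, h111, h11, h00⟩ := (pvValid_iff br p).mp hv
  rw [pvValid_iff]
  constructor
  · rintro ⟨g000, g111, g11, g00⟩
    have hns : ¬ ['0', '0'] <:+ p := (pvCnt_triple_zero_append '0' p h000).mp g000
    refine ⟨hns, ?_⟩
    rw [pvCnt_pair_append '0' p hns] at g00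
    push_cast at g00 ⊢
    split_ifs at g00 ⊢ <;> omega
  · rintro ⟨hns, hb⟩
    refine ⟨(pvCnt_triple_zero_append '0' p h000).mpr hns, ?_, ?_, ?_⟩
    · rw [pvCnt_triple_append_other '0' '1' (by decide) p]; exact h111
    · rw [pvCnt_pair_append_other '0' '1' (by decide) p]; exact h11
    · rw [pvCnt_pair_append '0' p hns]
      push_cast
      split_ifs at hb ⊢ <;> omega

lemma pvValid_append_one (br : Int) (p : List Char) (hv : pvValid br p = true) :
    pvValid br (p ++ ['1']) = true ↔
      (¬ ['1', '1'] <:+ p ∧ (pvCnt ['1', '1'] p : Int) + (if ['1'] <:+ p then 1 else 0) ≤ br) := by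
  obtain ⟨h000, h111, h11, h00⟩ := (pvValid_iff br p).mp hv
  rw [pvValid_iff]
  constructor
  · rintro ⟨g000, g111, g11, g00⟩
    have hns : ¬ ['1', '1'] <:+ p := (pvCnt_triple_zero_append '1' p h111).mp g111
    refine ⟨hns, ?_⟩
    rw [pvCnt_pair_append '1' p hns] at g11
    push_cast at g11 ⊢
    split_ifs at g11 ⊢ <;> omega
  · rintro ⟨hns, hb⟩
    refine ⟨?_, (pvCnt_triple_zero_append '1' p h111).mpr hns, ?_, ?_⟩
    · rw [pvCnt_triple_append_other '1' '0' (by decide) p]; exact h000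
    · rw [pvCnt_pair_append '1' p hns]
      push_cast
      split_ifs at hb ⊢ <;> omega
    · rw [pvCnt_pair_append_other '1' '0' (by decide) p]; exact h00

lemma pvValid_of_append (br : Int) (p : List Char) (c : Char) (hc : c = '0' ∨ c = '1')
    (hv : pvValid br (p ++ [c]) = true) : pvValid br p = true := by
  obtain ⟨g000, g111, g11, g00⟩ := (pvValid_iff br (p ++ [c])).mp hv
  rw [pvValid_iff]
  have hni000 : ¬ ['0', '0', '0'] <:+: p ++ [c] := (pvCnt_eq_zero_iff _ _ (by simp)).mp g000
  have hni111 : ¬ ['1', '1', '1'] <:+: p ++ [c] := (pvCnt_eq_zero_iff _ _ (by simp)).mp g111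
  have h000 : pvCnt ['0', '0', '0'] p = 0 :=
    (pvCnt_eq_zero_iff _ _ (by simp)).mpr
      (fun hi => hni000 ((infix_append_singleton _ _ _).mpr (Or.inl hi)))
  have h111 : pvCnt ['1', '1', '1'] p = 0 :=
    (pvCnt_eq_zero_iff _ _ (by simp)).mpr
      (fun hi => hni111 ((infix_append_singleton _ _ _).mpr (Or.inl hi)))
  refine ⟨h000, h111, ?_, ?_⟩
  · rcases hc with rfl | rfl
    · rw [pvCnt_pair_append_other '0' '1' (by decide) p] at g11; exact g11
    · by_cases hns : ['1', '1'] <:+ p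
      · exact absurd ((infix_append_singleton _ _ _).mpr
          (Or.inr (triple_suffix_append '1' p |>.mpr hns))) hni111
      · rw [pvCnt_pair_append '1' p hns] at g11
        push_cast at g11
        split_ifs at g11 <;> omega
  · rcases hc with rfl | rfl
    · by_cases hns : ['0', '0'] <:+ p
      · exact absurd ((infix_append_singleton _ _ _).mpr
          (Or.inr (triple_suffix_append '0' p |>.mpr hns))) hni000
      · rw [pvCnt_pair_append '0' p hns] at g00
        push_cast at g00
        split_ifs at g00 <;> omega
    · rw [pvCnt_pair_append_other '1' '0' (by decide) p] at g00; exact g00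

lemma pvCount_one_append_zero (p : List Char) :
    (p ++ ['0']).count '1' = p.count '1' := by
  simp [List.count_append]

lemma pvCount_one_append_one (p : List Char) :
    (p ++ ['1']).count '1' = p.count '1' + 1 := by
  simp [List.count_append]

lemma pvStep_elem (br : Int) (p : List Char) (hv : pvValid br p = true) :
    pvStep br [pvTag p] = ((pvExt p).filter (pvValid br)).map pvTag := by
  have hsplit : (pvExt p).filter (pvValid br) =
      (if pvValid br (p ++ ['0']) = true then [p ++ ['0']] else []) ++
      (if pvValid br (p ++ ['1']) = true then [p ++ ['1']] else []) := by
    simp only [pvExt, List.filter_cons, List.filter_nil]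
    split_ifs <;> simp
  rw [hsplit, List.map_append, apply_ite (List.map pvTag), apply_ite (List.map pvTag)]
  simp only [List.map_cons, List.map_nil]
  simp only [pvStep, List.flatMap_cons, List.flatMap_nil, List.append_nil, pvTag]
  congr 1
  · -- the '0' branch
    by_cases hs2 : ['0', '0'] <:+ p
    · rw [if_pos ((PySem.Chars.endswith_iff _ _).mpr hs2),
        if_neg (fun hh => ((pvValid_append_zero br p hv).mp hh).1 hs2)]
    · rw [if_neg (fun hh => hs2 ((PySem.Chars.endswith_iff _ _).mp hh))]
      by_cases hs1 : ['0'] <:+ p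
      · simp only [if_pos ((PySem.Chars.endswith_iff _ _).mpr hs1), if_pos hs1]
        by_cases hb : (pvCnt ['0', '0'] p : Int) + 1 ≤ br
        · rw [if_pos hb,
            if_pos ((pvValid_append_zero br p hv).mpr ⟨hs2, by simp [if_pos hs1]; omega⟩)]
          simp [pvTag, pvCount_one_append_zero, pvCnt_pair_append '0' p hs2,
            pvCnt_pair_append_other '0' '1' (by decide) p, if_pos hs1]
        · rw [if_neg hb, if_neg (fun hh => hb (by
            have := ((pvValid_append_zero br p hv).mp hh).2
            simpa [if_pos hs1] using this))]
      · simp only [if_neg (fun hh => hs1 ((PySem.Chars.endswith_iff _ _).mp hh)), if_neg hs1]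
        by_cases hb : (pvCnt ['0', '0'] p : Int) + 0 ≤ br
        · rw [if_pos hb,
            if_pos ((pvValid_append_zero br p hv).mpr ⟨hs2, by simp [if_neg hs1]; omega⟩)]
          simp [pvTag, pvCount_one_append_zero, pvCnt_pair_append '0' p hs2,
            pvCnt_pair_append_other '0' '1' (by decide) p, if_neg hs1]
        · rw [if_neg hb, if_neg (fun hh => hb (by
            have := ((pvValid_append_zero br p hv).mp hh).2
            simp [if_neg hs1] at this
            omega))]
  · -- the '1' branch
    by_cases hs2 : ['1', '1'] <:+ p
    · rw [if_pos ((PySem.Chars.endswith_iff _ _).mpr hs2),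
        if_neg (fun hh => ((pvValid_append_one br p hv).mp hh).1 hs2)]
    · rw [if_neg (fun hh => hs2 ((PySem.Chars.endswith_iff _ _).mp hh))]
      by_cases hs1 : ['1'] <:+ p
      · simp only [if_pos ((PySem.Chars.endswith_iff _ _).mpr hs1), if_pos hs1]
        by_cases hb : (pvCnt ['1', '1'] p : Int) + 1 ≤ br
        · rw [if_pos hb,
            if_pos ((pvValid_append_one br p hv).mpr ⟨hs2, by simp [if_pos hs1]; omega⟩)]
          simp [pvTag, pvCount_one_append_one, pvCnt_pair_append '1' p hs2,
            pvCnt_pair_append_other '1' '0' (by decide) p, if_pos hs1]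
        · rw [if_neg hb, if_neg (fun hh => hb (by
            have := ((pvValid_append_one br p hv).mp hh).2
            simpa [if_pos hs1] using this))]
      · simp only [if_neg (fun hh => hs1 ((PySem.Chars.endswith_iff _ _).mp hh)), if_neg hs1]
        by_cases hb : (pvCnt ['1', '1'] p : Int) + 0 ≤ br
        · rw [if_pos hb,
            if_pos ((pvValid_append_one br p hv).mpr ⟨hs2, by simp [if_neg hs1]; omega⟩)]
          simp [pvTag, pvCount_one_append_one, pvCnt_pair_append '1' p hs2,
            pvCnt_pair_append_other '1' '0' (by decide) p, if_neg hs1]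
        · rw [if_neg hb, if_neg (fun hh => hb (by
            have := ((pvValid_append_one br p hv).mp hh).2
            simp [if_neg hs1] at this
            omega))]

lemma pvStep_cons (br : Int) (x : List Char × Int × Int × Int) (rest : List (List Char × Int × Int × Int)) :
    pvStep br (x :: rest) = pvStep br [x] ++ pvStep br rest := by
  simp [pvStep]

lemma pvStep_main (br : Int) (L : List (List Char)) :
    pvStep br ((L.filter (pvValid br)).map pvTag) =
      ((L.flatMap pvExt).filter (pvValid br)).map pvTag := by
  induction L with
  | nil => simp [pvStep]
  | cons p L ih =>
    rw [List.flatMap_cons, List.filter_append, List.map_append, List.filter_cons]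
    by_cases hv : pvValid br p = true
    · rw [if_pos hv, List.map_cons, pvStep_cons, pvStep_elem br p hv, ih]
    · rw [if_neg hv, ih]
      have h0 : ((pvExt p).filter (pvValid br)) = [] := by
        simp only [pvExt, List.filter_cons, List.filter_nil]
        rw [if_neg (fun hh => hv (pvValid_of_append br p '0' (Or.inl rfl) hh)),
          if_neg (fun hh => hv (pvValid_of_append br p '1' (Or.inr rfl) hh))]
      rw [h0]
      simp

lemma pvValid_nil_of_nonneg (br : Int) (hbr : 0 ≤ br) : pvValid br [] = true := by
  simp [pvValid, pvCnt_nil, hbr]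

lemma pvStep_init (br : Int) :
    pvStep br [([], 0, 0, 0)] = ((pvProdE 1).filter (pvValid br)).map pvTag := by
  have htag : ([([], 0, 0, 0)] : List (List Char × Int × Int × Int)) = [pvTag []] := by
    simp [pvTag, pvCnt_nil]
  by_cases hbr : (0 : Int) ≤ br
  · rw [htag, pvStep_elem br [] (pvValid_nil_of_nonneg br hbr)]
    rfl
  · have hv0 : pvValid br ['0'] = false := by
      have : pvCnt ['0', '0'] ['0'] = 0 := by
        rw [pvCnt_cons]
        rw [if_neg (by simp [List.isPrefixOf_iff_prefix, List.cons_prefix_cons])]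
        exact pvCnt_nil _
      simp [pvValid, this]
      intro _ _ h
      omega
    have hv1 : pvValid br ['1'] = false := by
      have : pvCnt ['1', '1'] ['1'] = 0 := by
        rw [pvCnt_cons]
        rw [if_neg (by simp [List.isPrefixOf_iff_prefix, List.cons_prefix_cons])]
        exact pvCnt_nil _
      simp [pvValid, this]
      intro _ _
      omega
    have hL : pvStep br [([], 0, 0, 0)] = [] := by
      simp [pvStep, PySem.Chars.endswith]
      omega
    rw [hL]
    have : pvProdE 1 = [['0'], ['1']] := rfl
    rw [this]
    simp [List.filter_cons, hv0, hv1]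

lemma pvStates_eq (br : Int) (n : Nat) :
    (List.range (n + 1)).foldl (fun st _ => pvStep br st) [([], 0, 0, 0)] =
      ((pvProdE (n + 1)).filter (pvValid br)).map pvTag := by
  induction n with
  | zero =>
    rw [show List.range (0 + 1) = [0] from rfl]
    simp only [List.foldl_cons, List.foldl_nil]
    exact pvStep_init br
  | succ n ih =>
    rw [List.range_succ, List.foldl_append, ih]
    simp only [List.foldl_cons, List.foldl_nil]
    rw [pvStep_main]
    rfl

lemma pvB_normal (start_date end_date breaks : Int) :
    generate_home_away_pattern_string_py_alt start_date end_date breaks =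
      (((pvProdE (end_date - start_date + 1).toNat).filter (pvValid breaks)).filter pvBal).map
        String.ofList := by
  unfold generate_home_away_pattern_string_py_alt
  dsimp only
  cases hn : (end_date - start_date + 1).toNat with
  | zero =>
    rw [show List.range 0 = [] from rfl]
    simp only [List.foldl_nil]
    rw [show pvProdE 0 = [[]] from rfl, List.filter_comm]
    rw [show List.filter pvBal [[]] = [] from by simp [pvBal]]
    simp
  | succ m =>
    rw [pvStates_eq breaks m, List.filter_map, List.map_map]
    rfl

lemma pvA_normal (start_date end_date breaks : Int) :
    generate_home_away_pattern_string_py start_date end_date breaks =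
      (((pvProdE (end_date - start_date + 1).toNat).filter (pvValid breaks)).filter pvBal).map
        String.ofList := by
  unfold generate_home_away_pattern_string_py
  dsimp only
  rw [pvProd_eq_pvProdE]
  rw [List.filter_map, List.filter_map, List.filter_map, List.filter_map]
  rw [List.filter_filter, List.filter_filter, List.filter_filter, List.filter_filter]
  congr 1
  apply List.filter_congr
  intro p hp
  have hc := mem_pvProdE_count _ p hp
  have hbool : ∀ a b : Bool, (a = b) ↔ ((a = true) ↔ (b = true)) := by decide
  rw [hbool]
  simp only [Function.comp_apply, PySem.Str.count, String.toList_ofList,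
    show ("000" : String).toList = ['0', '0', '0'] from rfl,
    show ("111" : String).toList = ['1', '1', '1'] from rfl,
    show ("11" : String).toList = ['1', '1'] from rfl,
    show ("00" : String).toList = ['0', '0'] from rfl,
    show ("1" : String).toList = ['1'] from rfl,
    show ("0" : String).toList = ['0'] from rfl,
    count_eq_pvCnt p ['0', '0', '0'] (by simp), count_eq_pvCnt p ['1', '1', '1'] (by simp),
    count_eq_pvCnt p ['1', '1'] (by simp), count_eq_pvCnt p ['0', '0'] (by simp),
    count_eq_pvCnt p ['1'] (by simp), count_eq_pvCnt p ['0'] (by simp),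
    pvCnt_single, pvBal, pvValid]
  simp only [Bool.and_eq_true, Bool.or_eq_true, beq_iff_eq, decide_eq_true_eq]
  omega

-- ===== VERDICT (by name: the statement is the Claim_ definition above) =====
theorem generate_home_away_pattern_string_py_spec : Claim_equal_generate_home_away_pattern_string_py := by
  intro start_date end_date breaks _ _
  unfold Spec_generate_home_away_pattern_string_py
  rw [pvA_normal, pvB_normal]
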